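-- pv_equiv track=rewrite | github.com/Romathonat/RocketLeagueSkillsDetection | seqehc/utils.py | generate_bitset
-- ===== SOURCE A (Python) =====
-- def generate_bitset(itemset, data, bitset_slot_size):
--     """
--     Generate the bitset of itemset
--
--     :param itemset: the itemset we want to get the bitset
--     :param data: the dataset
--     :return: the bitset of itemset
--     """
--     bitset = 0
--
--     # we compute the extend by scanning the database
--     for line in data:
--         line = line[1:]
--         sequence_bitset = 0
--         for itemset_line in line:
--             if itemset.issubset(itemset_line):
--                 bit = 1
--             else:
--                 bit = 0
--
--             sequence_bitset |= bit
--             sequence_bitset = sequence_bitset << 1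
--
--         # for last element we need to reshift
--         sequence_bitset = sequence_bitset >> 1
--
--         # we shift to complete with 0
--         sequence_bitset = sequence_bitset << bitset_slot_size - (len(line))
--
--         # we add this bit vector to bitset
--         bitset |= sequence_bitset
--         bitset = bitset << bitset_slot_size
--
--     # for the last element we need to reshift
--     bitset = bitset >> bitset_slot_size
--
--     return bitset
-- ===== SOURCE B (Python) =====
-- def generate_bitset(itemset, data, bitset_slot_size):
--     """Build each line's slot as a '1'/'0' string parsed with int(chunk, 2),
--     and assemble the result back-to-front: walk the lines in reverse, or each
--     parsed chunk in at a running slot offset (empty/zero chunks cost nothing)."""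
--     result = 0
--     offset = 0
--     for line in reversed(data):
--         chunk = ''.join('1' if itemset.issubset(x) else '0' for x in line[1:])
--         if chunk:
--             result |= int(chunk, 2) << (offset + bitset_slot_size - len(chunk))
--         offset += bitset_slot_size
--     return result
-- ===== Notes on version B (the rewrite author's own statement) =====
-- stated objective: alternative
-- what changed: Replaces A's forward shift-or accumulator (or-in bit, shift, re-shift, pad-shift, or into the running bitset, final re-shift) by building each line's slot as a '1'/'0' string parsed once with int(chunk, 2) and assembling the result back-to-front, or-ing each parsed chunk in at a running slot offset.
import Mathlib
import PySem

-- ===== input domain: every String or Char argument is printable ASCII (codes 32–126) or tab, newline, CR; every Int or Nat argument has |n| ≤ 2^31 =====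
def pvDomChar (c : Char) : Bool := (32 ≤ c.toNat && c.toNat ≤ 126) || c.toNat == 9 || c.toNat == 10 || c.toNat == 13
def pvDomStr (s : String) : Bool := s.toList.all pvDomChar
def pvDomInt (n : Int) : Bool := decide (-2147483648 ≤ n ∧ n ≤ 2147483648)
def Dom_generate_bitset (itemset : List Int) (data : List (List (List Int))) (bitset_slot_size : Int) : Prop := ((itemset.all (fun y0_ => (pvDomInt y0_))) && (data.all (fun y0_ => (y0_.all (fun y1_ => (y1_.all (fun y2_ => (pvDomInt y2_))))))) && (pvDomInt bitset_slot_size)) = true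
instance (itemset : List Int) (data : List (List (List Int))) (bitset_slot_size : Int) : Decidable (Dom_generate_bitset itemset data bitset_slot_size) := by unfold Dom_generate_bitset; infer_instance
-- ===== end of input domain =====

-- B builds each line's slot as a '1'/'0' string parsed with int(chunk, 2) and assembles
-- the result back-to-front at a running offset, instead of A's forward shift-or
-- accumulator arithmetic (objective: alternative).

-- ===== PORT A =====
-- itemset.issubset(itemset_line): every element of the set occurs in the list
def pyIssubset (s : List Int) (l : List Int) : Bool := s.all (fun x => l.contains x)

def generate_bitset (itemset : List Int) (data : List (List (List Int))) (bitset_slot_size : Int) : Int :=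
  (data.foldl (fun (bitset : Int) line =>
      let line := line.drop 1          -- line[1:]
      let sequence_bitset : Int :=
        line.foldl (fun (sequence_bitset : Int) itemset_line =>
          let bit : Int := if pyIssubset itemset itemset_line then 1 else 0
          (PySem.Int.bor sequence_bitset bit) <<< (1 : Nat)) (0 : Int)
      let sequence_bitset : Int := sequence_bitset >>> (1 : Nat)
      -- Python raises ValueError on a negative shift count; Pre_ excludes those inputs, and .toNat is exact for a nonnegative count
      let sequence_bitset : Int := sequence_bitset <<< (bitset_slot_size - (line.length : Int)).toNat
      (PySem.Int.bor bitset sequence_bitset) <<< bitset_slot_size.toNat) (0 : Int))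
    >>> bitset_slot_size.toNat

-- ===== PORT B =====
-- ''.join of the generator: the '1'/'0' character list of line[1:]
def bitChunk (itemset : List Int) (line : List (List Int)) : List Char :=
  (line.drop 1).map (fun x => if pyIssubset itemset x then '1' else '0')

-- int(s, 2): binary numeral value; exact for the nonempty '0'/'1' strings built here
def parseBin (cs : List Char) : Int :=
  cs.foldl (fun a c => 2 * a + (if c = '1' then 1 else 0)) 0

def generate_bitset_alt (itemset : List Int) (data : List (List (List Int))) (bitset_slot_size : Int) : Int :=
  -- for line in reversed(data), with state (result, offset)
  (data.reverse.foldl (fun (st : Int × Int) line =>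
      let chunk := bitChunk itemset line
      let result : Int :=
        if chunk.isEmpty then st.1
        -- Python raises ValueError on a negative shift count; Pre_ excludes those inputs, and .toNat is exact for a nonnegative count
        else PySem.Int.bor st.1 (parseBin chunk <<< (st.2 + bitset_slot_size - (chunk.length : Int)).toNat)
      (result, st.2 + bitset_slot_size)) ((0 : Int), (0 : Int))).1

-- ===== PRECONDITION & SPEC =====
-- Pre_ excludes exactly the inputs where A raises ValueError (negative shift count):
-- a negative bitset_slot_size, or a line whose tail is longer than bitset_slot_size.
def Pre_generate_bitset (itemset : List Int) (data : List (List (List Int))) (bitset_slot_size : Int) : Prop :=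
  0 ≤ bitset_slot_size ∧ ∀ line ∈ data, ((line.drop 1).length : Int) ≤ bitset_slot_size

instance (itemset : List Int) (data : List (List (List Int))) (bitset_slot_size : Int) : Decidable (Pre_generate_bitset itemset data bitset_slot_size) := by unfold Pre_generate_bitset; infer_instance

def pvWitness_generate_bitset : List Int × List (List (List Int)) × Int :=
  ([1], [[[0], [1, 2]], [[5], [3], [1]]], 2)

def Spec_generate_bitset (itemset : List Int) (data : List (List (List Int))) (bitset_slot_size : Int) (out : Int) : Prop := out = generate_bitset_alt itemset data bitset_slot_size
instance (itemset : List Int) (data : List (List (List Int))) (bitset_slot_size : Int) (out : Int) : Decidable (Spec_generate_bitset itemset data bitset_slot_size out) := by unfold Spec_generate_bitset; infer_instance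

-- ===== CLAIM (what is proved, stated in full; the proofs are below) =====
def Claim_equal_generate_bitset : Prop := ∀ (itemset : List Int) (data : List (List (List Int))) (bitset_slot_size : Int), Dom_generate_bitset itemset data bitset_slot_size → Pre_generate_bitset itemset data bitset_slot_size → Spec_generate_bitset itemset data bitset_slot_size (generate_bitset itemset data bitset_slot_size)

-- ===== LEMMAS AND PROOFS =====

-- Horner step and the value of a bit list (MSB first)
def hstep (v : Int) (b : Bool) : Int := 2 * v + (if b then 1 else 0)

def bitsVal (bs : List Bool) : Int := bs.foldl hstep 0

theorem foldl_hstep_eq (bs : List Bool) : ∀ v : Int, bs.foldl hstep v = v * 2 ^ bs.length + bitsVal bs := by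
  induction bs with
  | nil => intro v; simp [bitsVal]
  | cons b bs ih =>
      intro v
      simp only [List.foldl_cons, List.length_cons, bitsVal] at *
      rw [ih (hstep v b), ih (hstep 0 b)]
      simp only [hstep]
      ring

theorem bitsVal_nonneg (bs : List Bool) : 0 ≤ bitsVal bs := by
  induction bs with
  | nil => simp [bitsVal]
  | cons b bs ih =>
      have h := foldl_hstep_eq bs (hstep 0 b)
      have hb : (0:Int) ≤ hstep 0 b := by unfold hstep; split <;> omega
      have hp : (0:Int) ≤ 2 ^ bs.length := by positivity
      simp only [bitsVal, List.foldl_cons] at *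
      rw [h]; nlinarith

theorem bitsVal_lt (bs : List Bool) : bitsVal bs < 2 ^ bs.length := by
  induction bs with
  | nil => simp [bitsVal]
  | cons b bs ih =>
      have h := foldl_hstep_eq bs (hstep 0 b)
      have hb : hstep 0 b ≤ 1 := by unfold hstep; split <;> omega
      have hp : (0:Int) < 2 ^ bs.length := by positivity
      simp only [bitsVal, List.foldl_cons, List.length_cons] at *
      rw [h, pow_succ]
      nlinarith

-- Python | of a slot-aligned value with a small value is addition
theorem bor_two_pow_mul_add (k : Nat) (c s : Int) (hc : 0 ≤ c) (hs : 0 ≤ s) (hlt : s < 2 ^ k) :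
    PySem.Int.bor (2 ^ k * c) s = 2 ^ k * c + s := by
  obtain ⟨m, rfl⟩ : ∃ m : Nat, c = (m : Int) := ⟨c.toNat, (Int.toNat_of_nonneg hc).symm⟩
  obtain ⟨n, rfl⟩ : ∃ n : Nat, s = (n : Int) := ⟨s.toNat, (Int.toNat_of_nonneg hs).symm⟩
  have hn : n < 2 ^ k := by exact_mod_cast hlt
  have h1 : (2 ^ k * (m : Int)) = ((2 ^ k * m : Nat) : Int) := by push_cast; ring
  rw [h1, PySem.Int.bor_natCast, ← Nat.two_pow_add_eq_or_of_lt hn m]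
  push_cast; ring

-- A's inner shift-or loop computes twice the Horner value of the line's bits
theorem foldA_inner_eq (itemset : List Int) (l : List (List Int)) : ∀ t : Int, 0 ≤ t →
    l.foldl (fun (sequence_bitset : Int) itemset_line =>
        (PySem.Int.bor sequence_bitset (if pyIssubset itemset itemset_line then 1 else 0)) <<< (1 : Nat)) (2 * t)
      = 2 * (l.map (fun il => pyIssubset itemset il)).foldl hstep t := by
  induction l with
  | nil => intro t _; simp
  | cons x l ih =>
      intro t ht
      have hbit : PySem.Int.bor (2 * t) (if pyIssubset itemset x then 1 else 0) = 2 * t + (if pyIssubset itemset x then 1 else 0) := by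
        have := bor_two_pow_mul_add 1 t (if pyIssubset itemset x then 1 else 0) ht (by split <;> omega) (by split <;> norm_num)
        simpa using this
      simp only [List.foldl_cons, List.map_cons]
      rw [hbit, Int.shiftLeft_eq]
      have hstep_eq : (2 * t + (if pyIssubset itemset x then 1 else 0)) * 2 ^ (1:Nat) = 2 * hstep t (pyIssubset itemset x) := by
        simp only [hstep]; ring
      rw [hstep_eq, ih _ (by unfold hstep; split <;> omega)]

-- the value of one line's slot (Horner value of its bits, padded to the slot width)
def slotVal (itemset : List Int) (bss : Int) (line : List (List Int)) : Int :=
  bitsVal ((line.drop 1).map (fun il => pyIssubset itemset il)) * 2 ^ (bss - ((line.drop 1).length : Int)).toNat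

theorem slotVal_nonneg (itemset : List Int) (bss : Int) (line : List (List Int)) : 0 ≤ slotVal itemset bss line := by
  have h := bitsVal_nonneg ((line.drop 1).map (fun il => pyIssubset itemset il))
  have hp : (0:Int) ≤ 2 ^ (bss - ((line.drop 1).length : Int)).toNat := by positivity
  unfold slotVal; positivity

theorem slotVal_lt (itemset : List Int) (bss : Int) (line : List (List Int))
    (h0 : 0 ≤ bss) (hl : ((line.drop 1).length : Int) ≤ bss) :
    slotVal itemset bss line < 2 ^ bss.toNat := by
  have hlen : ((line.drop 1).map (fun il => pyIssubset itemset il)).length = (line.drop 1).length := by simp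
  have hv := bitsVal_lt ((line.drop 1).map (fun il => pyIssubset itemset il))
  rw [hlen] at hv
  have hK : (line.drop 1).length + (bss - ((line.drop 1).length : Int)).toNat = bss.toNat := by omega
  have hp : (0:Int) < 2 ^ (bss - ((line.drop 1).length : Int)).toNat := by positivity
  unfold slotVal
  calc bitsVal ((line.drop 1).map (fun il => pyIssubset itemset il)) * 2 ^ (bss - ((line.drop 1).length : Int)).toNat
      < 2 ^ (line.drop 1).length * 2 ^ (bss - ((line.drop 1).length : Int)).toNat := by
        exact mul_lt_mul_of_pos_right hv hp
    _ = 2 ^ bss.toNat := by rw [← pow_add, hK]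

-- A's outer loop, from a slot-aligned accumulator
theorem foldA_outer_eq (itemset : List Int) (bss : Int) (h0 : 0 ≤ bss) (data : List (List (List Int))) :
    ∀ c : Int, 0 ≤ c → (∀ line ∈ data, ((line.drop 1).length : Int) ≤ bss) →
    data.foldl (fun bitset line =>
        (PySem.Int.bor bitset
          (((((line.drop 1).foldl (fun (sequence_bitset : Int) itemset_line =>
              (PySem.Int.bor sequence_bitset (if pyIssubset itemset itemset_line then 1 else 0)) <<< (1 : Nat)) (0 : Int) : Int)) >>> (1 : Nat))
            <<< (bss - ((line.drop 1).length : Int)).toNat)) <<< bss.toNat) (2 ^ bss.toNat * c)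
      = 2 ^ bss.toNat * data.foldl (fun v line => 2 ^ bss.toNat * v + slotVal itemset bss line) c := by
  induction data with
  | nil => intro c _ _; simp
  | cons line data ih =>
      intro c hc hlines
      have hline := hlines line (List.mem_cons_self ..)
      have hinner : (line.drop 1).foldl (fun (sequence_bitset : Int) itemset_line =>
          (PySem.Int.bor sequence_bitset (if pyIssubset itemset itemset_line then 1 else 0)) <<< (1 : Nat)) (0 : Int)
          = 2 * bitsVal ((line.drop 1).map (fun il => pyIssubset itemset il)) := by
        have := foldA_inner_eq itemset (line.drop 1) 0 le_rfl
        simpa [bitsVal] using this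
      have hshr : (2 * bitsVal ((line.drop 1).map (fun il => pyIssubset itemset il))) >>> (1 : Nat)
          = bitsVal ((line.drop 1).map (fun il => pyIssubset itemset il)) := by
        rw [Int.shiftRight_eq_div_pow]
        simpa using Int.mul_ediv_cancel_left (bitsVal ((line.drop 1).map (fun il => pyIssubset itemset il))) (by norm_num : (2:Int) ≠ 0)
      have hbor : PySem.Int.bor (2 ^ bss.toNat * c) (slotVal itemset bss line)
          = 2 ^ bss.toNat * c + slotVal itemset bss line :=
        bor_two_pow_mul_add bss.toNat c _ hc (slotVal_nonneg ..) (slotVal_lt itemset bss line h0 hline)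
      have hslot : bitsVal ((line.drop 1).map (fun il => pyIssubset itemset il)) * 2 ^ (bss - ((line.drop 1).length : Int)).toNat = slotVal itemset bss line := rfl
      simp only [List.foldl_cons]
      simp only [Int.shiftLeft_eq] at ih hinner ⊢
      rw [hinner, hshr, hslot, hbor]
      have hc' : 0 ≤ 2 ^ bss.toNat * c + slotVal itemset bss line := by
        have := slotVal_nonneg itemset bss line
        have hp : (0:Int) ≤ 2 ^ bss.toNat := by positivity
        nlinarith
      have halign : (2 ^ bss.toNat * c + slotVal itemset bss line) * 2 ^ bss.toNat
          = 2 ^ bss.toNat * (2 ^ bss.toNat * c + slotVal itemset bss line) := by ring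
      rw [halign, ih _ hc' (fun l hl => hlines l (List.mem_cons_of_mem _ hl))]

-- ===== B-side lemmas: the value of the back-to-front assembly =====

-- the '1'/'0' chunk of a line parses to the Horner value of its bits
theorem map_chunk_foldl (itemset : List Int) (l : List (List Int)) : ∀ v : Int,
    (l.map (fun x => if pyIssubset itemset x then '1' else '0')).foldl (fun a c => 2 * a + (if c = '1' then 1 else 0)) v
      = (l.map (fun il => pyIssubset itemset il)).foldl hstep v := by
  induction l with
  | nil => intro v; rfl
  | cons x l ih =>
      intro v
      simp only [List.map_cons, List.foldl_cons]
      have hc : (2 * v + (if (if pyIssubset itemset x then '1' else '0') = '1' then (1:Int) else 0))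
          = hstep v (pyIssubset itemset x) := by
        unfold hstep; by_cases h : pyIssubset itemset x <;> simp [h]
      rw [hc, ih]

theorem parseBin_bitChunk (itemset : List Int) (line : List (List Int)) :
    parseBin (bitChunk itemset line) = bitsVal ((line.drop 1).map (fun il => pyIssubset itemset il)) := by
  unfold parseBin bitChunk bitsVal
  exact map_chunk_foldl itemset (line.drop 1) 0

-- the slots of ys laid out from bit 0 upwards (ys is a reversed suffix of data)
def revVal (itemset : List Int) (bss : Int) (ys : List (List (List Int))) : Int :=
  ys.foldr (fun l acc => slotVal itemset bss l + 2 ^ bss.toNat * acc) 0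

-- B's loop from any state (r, off) with r below bit off: it adds revVal at offset off
theorem foldB_rev_eq (itemset : List Int) (bss : Int) (h0 : 0 ≤ bss) (ys : List (List (List Int))) :
    ∀ (r off : Int), 0 ≤ off → 0 ≤ r → r < 2 ^ off.toNat →
    (∀ line ∈ ys, ((line.drop 1).length : Int) ≤ bss) →
    ys.foldl (fun (st : Int × Int) line =>
        let chunk := bitChunk itemset line
        let result : Int :=
          if chunk.isEmpty then st.1
          else PySem.Int.bor st.1 (parseBin chunk <<< (st.2 + bss - (chunk.length : Int)).toNat)
        (result, st.2 + bss)) (r, off)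
      = (r + 2 ^ off.toNat * revVal itemset bss ys, off + bss * ys.length) := by
  induction ys with
  | nil => intro r off _ _ _ _; simp [revVal]
  | cons line ys ih =>
      intro r off hoff hr0 hrlt hlines
      have hline := hlines line (List.mem_cons_self ..)
      have hlen : (bitChunk itemset line).length = (line.drop 1).length := by
        unfold bitChunk; simp
      have hslot0 : 0 ≤ slotVal itemset bss line := slotVal_nonneg ..
      have hslotK : slotVal itemset bss line < 2 ^ bss.toNat := slotVal_lt itemset bss line h0 hline
      have hstep1 : (if (bitChunk itemset line).isEmpty then r
            else PySem.Int.bor r (parseBin (bitChunk itemset line) <<< (off + bss - ((bitChunk itemset line).length : Int)).toNat))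
          = r + slotVal itemset bss line * 2 ^ off.toNat := by
        by_cases he : (bitChunk itemset line).isEmpty
        · have hnil : (line.drop 1) = [] := by
            rw [List.isEmpty_iff] at he
            have := hlen; rw [he] at this
            exact List.eq_nil_of_length_eq_zero this.symm
          have : slotVal itemset bss line = 0 := by
            unfold slotVal; rw [hnil]; simp [bitsVal]
          simp [he, this]
        · have hvb : parseBin (bitChunk itemset line) = bitsVal ((line.drop 1).map (fun il => pyIssubset itemset il)) :=
            parseBin_bitChunk itemset line
          have htn : (off + bss - (((bitChunk itemset line).length : Nat) : Int)).toNat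
              = (bss - ((line.drop 1).length : Int)).toNat + off.toNat := by
            rw [hlen]; omega
          have hsh : parseBin (bitChunk itemset line) <<< (off + bss - (((bitChunk itemset line).length : Nat) : Int)).toNat
              = 2 ^ off.toNat * slotVal itemset bss line := by
            rw [Int.shiftLeft_eq, htn, hvb, pow_add]
            unfold slotVal; ring
          rw [if_neg he, hsh, PySem.Int.bor_comm,
            bor_two_pow_mul_add off.toNat (slotVal itemset bss line) r hslot0 hr0 hrlt]
          ring
      simp only [List.foldl_cons]
      rw [hstep1]
      have hr0' : 0 ≤ r + slotVal itemset bss line * 2 ^ off.toNat := by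
        have hp : (0:Int) ≤ 2 ^ off.toNat := by positivity
        nlinarith
      have hoff' : 0 ≤ off + bss := by omega
      have htoNat : (off + bss).toNat = off.toNat + bss.toNat := by omega
      have hrlt' : r + slotVal itemset bss line * 2 ^ off.toNat < 2 ^ (off + bss).toNat := by
        rw [htoNat, pow_add]
        have hp : (0:Int) < 2 ^ off.toNat := by positivity
        nlinarith
      rw [ih _ _ hoff' hr0' hrlt' (fun l hl => hlines l (List.mem_cons_of_mem _ hl))]
      unfold revVal
      simp only [List.foldr_cons, List.length_cons, Prod.mk.injEq]
      constructor
      · rw [htoNat, pow_add]; ring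
      · push_cast; ring

-- ===== VERDICT (by name: the statement is the Claim_ definition above) =====
theorem generate_bitset_spec : Claim_equal_generate_bitset := by
  intro itemset data bss _ hpre
  obtain ⟨h0, hlines⟩ := hpre
  unfold Spec_generate_bitset generate_bitset generate_bitset_alt
  have hA := foldA_outer_eq itemset bss h0 data 0 le_rfl hlines
  simp only [mul_zero] at hA
  rw [hA, Int.shiftRight_eq_div_pow]
  push_cast
  rw [Int.mul_ediv_cancel_left _ (by positivity : (2:Int) ^ bss.toNat ≠ 0)]
  have hB := foldB_rev_eq itemset bss h0 data.reverse 0 0 le_rfl le_rfl (by norm_num)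
    (fun l hl => hlines l (List.mem_reverse.mp hl))
  rw [hB]
  simp only [Int.toNat_zero, pow_zero, one_mul, zero_add]
  unfold revVal
  rw [List.foldr_reverse]
  have hfun : (fun (v : Int) (line : List (List Int)) => 2 ^ bss.toNat * v + slotVal itemset bss line)
      = fun v line => slotVal itemset bss line + 2 ^ bss.toNat * v := by
    funext v line; ring
  rw [hfun]
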